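-- pv_equiv track=rewrite | github.com/ciaranclear/ipv4_network_calculator | network_calc/ipv4_networks/ipv4_networks.py | min_hosts
-- ===== SOURCE A (Python) =====
-- class IPv4NetworksError(Exception):
--     def __init__(self, message: str) -> None:
--         """
--
--         """
--         super().__init__(message)
--
-- def min_hosts(hosts, cidr: bool=False) -> int:
--     """
--
--     """
--     if not isinstance(hosts, int):
--         msg = f"hosts must be type int not type {type(hosts)}"
--         raise IPv4NetworksError(msg)
--     if not (0 < hosts < 2**32):
--         msg = (f"hosts value {hosts} is out of range. "
--                f"Must be in range 0 -> {2**32}")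
--         raise IPv4NetworksError(msg)
--
--     n = 1 if cidr else 256
--
--     while n < 2**32:
--         if (n - 2) >= hosts:
--             return n - 2
--         n *= 2
-- ===== SOURCE B (Python) =====
-- class IPv4NetworksError(Exception):
--     def __init__(self, message: str) -> None:
--         """
--
--         """
--         super().__init__(message)
--
--
-- def min_hosts(hosts, cidr: bool = False) -> int:
--     # Closed form: smallest power of two n >= start with n - 2 >= hosts.
--     if not isinstance(hosts, int):
--         msg = f"hosts must be type int not type {type(hosts)}"
--         raise IPv4NetworksError(msg)
--     if not (0 < hosts < 2**32):
--         msg = (f"hosts value {hosts} is out of range. "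
--                f"Must be in range 0 -> {2**32}")
--         raise IPv4NetworksError(msg)
--
--     start = 1 if cidr else 256
--     n = max(start, 1 << (hosts + 1).bit_length())
--     if n < 2**32:
--         return n - 2
-- ===== Notes on version B (the rewrite author's own statement) =====
-- stated objective: faster
-- what changed: Replaces the doubling while-loop with a closed-form computation of the smallest admissible power of two via bit_length.
-- outside the precondition, e.g. on min_hosts(2147483647, False): A returns None, B returns None; on min_hosts(0, False): A raises IPv4NetworksError, B raises IPv4NetworksError
import Mathlib
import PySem

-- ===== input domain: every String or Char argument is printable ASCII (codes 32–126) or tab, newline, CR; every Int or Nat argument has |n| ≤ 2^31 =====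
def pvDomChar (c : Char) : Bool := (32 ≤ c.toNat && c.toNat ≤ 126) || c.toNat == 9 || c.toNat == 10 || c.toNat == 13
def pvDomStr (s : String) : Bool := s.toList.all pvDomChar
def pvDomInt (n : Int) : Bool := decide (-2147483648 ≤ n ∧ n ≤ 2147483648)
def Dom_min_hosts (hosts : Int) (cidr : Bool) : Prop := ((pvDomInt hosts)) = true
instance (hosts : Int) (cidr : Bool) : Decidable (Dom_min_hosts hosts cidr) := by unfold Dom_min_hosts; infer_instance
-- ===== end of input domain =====

-- B replaces A's doubling while-loop by a closed-form bit_length computation (O(1) vs O(log hosts)).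


-- ===== PORT A =====
-- A's while loop: n doubles while n < 2^32; fuel 33 suffices to cover every pass the
-- Python loop can make (n starts at ≥ 1 and exits once n ≥ 2^32); the fuel-0 and
-- loop-exit branches return 0, which Python A reaches only by falling off the loop
-- returning None — those inputs are outside Pre_min_hosts.
def minHostsLoop : Nat → Int → Int → Int
  | 0, _, _ => 0
  | f + 1, hosts, n =>
    if n < 2 ^ 32 then
      if hosts ≤ n - 2 then n - 2 else minHostsLoop f hosts (n * 2)
    else 0

def min_hosts (hosts : Int) (cidr : Bool) : Int :=
  minHostsLoop 33 hosts (if cidr then 1 else 256)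

-- ===== PORT B =====
-- Python's (hosts+1).bit_length() is Nat.size (hosts+1).toNat (exact for hosts ≥ 0),
-- and 1 << k is 1 <<< k.  The fall-through (Python returns None) returns 0 here; it
-- is outside Pre_min_hosts.
def min_hosts_alt (hosts : Int) (cidr : Bool) : Int :=
  let start : Int := if cidr then 1 else 256
  let n : Int := max start ((1 <<< Nat.size (hosts + 1).toNat : Nat) : Int)
  if n < 2 ^ 32 then n - 2 else 0

-- ===== PRECONDITION & SPEC =====
-- Pre_ excludes hosts ≤ 0 and hosts ≥ 2^32 (A raises IPv4NetworksError) and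
-- hosts ∈ [2^31-1, 2^32-1], where A's loop falls through and returns None — not a
-- value of the declared int return type (B behaves identically on all of these).
def Pre_min_hosts (hosts : Int) (cidr : Bool) : Prop :=
  1 ≤ hosts ∧ hosts ≤ 2 ^ 31 - 2
instance (hosts : Int) (cidr : Bool) : Decidable (Pre_min_hosts hosts cidr) := by
  unfold Pre_min_hosts; infer_instance

def pvWitness_min_hosts : Int × Bool := (300, false)

def Spec_min_hosts (hosts : Int) (cidr : Bool) (out : Int) : Prop := out = min_hosts_alt hosts cidr
instance (hosts : Int) (cidr : Bool) (out : Int) : Decidable (Spec_min_hosts hosts cidr out) := by unfold Spec_min_hosts; infer_instance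

-- ===== CLAIM (what is proved, stated in full; the proofs are below) =====
def Claim_equal_min_hosts : Prop := ∀ (hosts : Int) (cidr : Bool), Dom_min_hosts hosts cidr → Pre_min_hosts hosts cidr → Spec_min_hosts hosts cidr (min_hosts hosts cidr)

-- ===== LEMMAS AND PROOFS =====

-- Invariant of A's loop: started at a power of two 2^j with enough fuel, it returns
-- max (2^j) (2^(size (hosts+1))) - 2, the closed form B computes.
lemma minHostsLoop_eq (f : Nat) : ∀ (j : Nat) (hosts : Int),
    1 ≤ hosts → hosts ≤ 2 ^ 31 - 2 → j ≤ 31 →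
    (2 : Int) ^ 32 ≤ 2 ^ j * 2 ^ f →
    minHostsLoop f hosts (2 ^ j) =
      max ((2 : Int) ^ j) (2 ^ Nat.size (hosts + 1).toNat) - 2 := by
  induction f with
  | zero =>
    intro j hosts h1 h2 hj hfuel
    exfalso
    have hle : (2 : Int) ^ j ≤ 2 ^ 31 := pow_le_pow_right₀ (by norm_num) hj
    simp at hfuel
    have : (2 : Int) ^ 31 < 2 ^ 32 := by norm_num
    omega
  | succ f ih =>
    intro j hosts h1 h2 hj hfuel
    have hle : (2 : Int) ^ j ≤ 2 ^ 31 := pow_le_pow_right₀ (by norm_num) hj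
    have hlt : (2 : Int) ^ j < 2 ^ 32 := by
      have : (2 : Int) ^ 31 < 2 ^ 32 := by norm_num
      omega
    have hm : ((hosts + 1).toNat : Int) = hosts + 1 := Int.toNat_of_nonneg (by omega)
    rw [minHostsLoop, if_pos hlt]
    by_cases hc : hosts ≤ 2 ^ j - 2
    · rw [if_pos hc]
      -- here 2^size m ≤ 2^j : m = hosts+1 < 2^j
      have hmlt : (hosts + 1).toNat < 2 ^ j := by
        have : ((hosts + 1).toNat : Int) < ((2 ^ j : Nat) : Int) := by push_cast; omega
        exact_mod_cast this
      have hsz : Nat.size (hosts + 1).toNat ≤ j := Nat.size_le.mpr hmlt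
      have : ((2 : Int) ^ Nat.size (hosts + 1).toNat) ≤ 2 ^ j :=
        pow_le_pow_right₀ (by norm_num) hsz
      rw [max_eq_left this]
    · rw [if_neg hc]
      -- here 2^j ≤ m = hosts+1, so j < size m
      have hge : 2 ^ j ≤ (hosts + 1).toNat := by
        have : ((2 ^ j : Nat) : Int) ≤ ((hosts + 1).toNat : Int) := by push_cast; omega
        exact_mod_cast this
      have hjk : j < Nat.size (hosts + 1).toNat := Nat.lt_size.mpr hge
      have hk31 : Nat.size (hosts + 1).toNat ≤ 31 := by
        apply Nat.size_le.mpr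
        have : ((hosts + 1).toNat : Int) < ((2 ^ 31 : Nat) : Int) := by push_cast; omega
        exact_mod_cast this
      have hj1 : j + 1 ≤ 31 := by omega
      have hstep : (2 : Int) ^ j * 2 = 2 ^ (j + 1) := by ring
      have hfuel' : (2 : Int) ^ 32 ≤ 2 ^ (j + 1) * 2 ^ f := by
        rw [← hstep]; calc (2 : Int) ^ 32 ≤ 2 ^ j * 2 ^ (f + 1) := hfuel
          _ = 2 ^ j * 2 * 2 ^ f := by ring
      rw [hstep, ih (j + 1) hosts h1 h2 hj1 hfuel']
      -- both maxes are 2^size m since 2^(j+1) ≤ 2^size m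
      have hkk : (2 : Int) ^ (j + 1) ≤ 2 ^ Nat.size (hosts + 1).toNat :=
        pow_le_pow_right₀ (by norm_num) hjk
      have hkk' : (2 : Int) ^ j ≤ 2 ^ Nat.size (hosts + 1).toNat :=
        pow_le_pow_right₀ (by norm_num) (by omega)
      rw [max_eq_right hkk, max_eq_right hkk']

-- 1 <<< size m, cast to Int, is (2 : Int) ^ size m
lemma shift_size_int (m : Nat) : ((1 <<< Nat.size m : Nat) : Int) = (2 : Int) ^ Nat.size m := by
  rw [Nat.one_shiftLeft]; push_cast; ring

-- ===== VERDICT (by name: the statement is the Claim_ definition above) =====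
theorem min_hosts_spec : Claim_equal_min_hosts := by
  intro hosts cidr _ hpre
  obtain ⟨h1, h2⟩ := hpre
  unfold Spec_min_hosts min_hosts min_hosts_alt
  have hk31 : Nat.size (hosts + 1).toNat ≤ 31 := by
    apply Nat.size_le.mpr
    have hm : ((hosts + 1).toNat : Int) = hosts + 1 := Int.toNat_of_nonneg (by omega)
    have : ((hosts + 1).toNat : Int) < ((2 ^ 31 : Nat) : Int) := by push_cast; omega
    exact_mod_cast this
  have hP : (2 : Int) ^ Nat.size (hosts + 1).toNat ≤ 2 ^ 31 :=
    pow_le_pow_right₀ (by norm_num) hk31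
  cases cidr with
  | false =>
    simp only [Bool.false_eq_true, if_false]
    have h := minHostsLoop_eq 33 8 hosts h1 h2 (by norm_num) (by norm_num)
    norm_num at h
    rw [h, shift_size_int]
    rw [if_pos (by
      have h32 : (2 : Int) ^ 31 < 2 ^ 32 := by norm_num
      simp only [max_lt_iff]; omega)]
  | true =>
    simp only [if_true]
    have h := minHostsLoop_eq 33 0 hosts h1 h2 (by norm_num) (by norm_num)
    norm_num at h
    rw [h, shift_size_int]
    rw [if_pos (by
      have h32 : (2 : Int) ^ 31 < 2 ^ 32 := by norm_num
      simp only [max_lt_iff]; omega)]
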